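-- pv_equiv track=rewrite | github.com/JulesdeCube/FailArchi | main.py | struct_to_paths
-- ===== SOURCE A (Python) =====
-- def nb_start_space(s : str) -> int:
--   """
--   get the number of space at the start
--
--   :param s: the string to count space
--
--   :return: the number of space at the start of `s`
--   """
--   length = len(s)
--   for i in range(length):
--     if s[i] != ' ':
--       return i
--   return length
--
-- def struct_to_paths(root : str, data : str, tabsize : int = 4) -> list:
--   """
--   create paths from a html list architecture
--
--   :param root: path to the root folder
--   :param struct: a list of file indented by `tabsize` spaces
--   :param tabsize: the number space composing 1 indentation
--
--   :return: the list of path to create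
--   """
--   if root[-1] != '/':
--     root += '/'
--
--   paths = []
--   path = [root]
--   for element in data:
--     deep = nb_start_space(element) // tabsize
--     path = path[:deep] + [element[deep * tabsize:]]
--     paths.append(''.join(path))
--
--   return paths
-- ===== SOURCE B (Python) =====
-- def struct_to_paths(root, data, tabsize=4):
--     if not root.endswith('/'):
--         root = root + '/'
--     paths = []
--     pref = {0: root}   # stack position -> cumulative path prefix
--     size = 1           # current logical stack size
--     for element in data:
--         deep = (len(element) - len(element.lstrip(' '))) // tabsize
--         d = min(deep, size)
--         full = (pref.get(d - 1, '') if d > 0 else '') + element[deep * tabsize:]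
--         pref[d] = full
--         size = d + 1
--         paths.append(full)
--     return paths
-- ===== Notes on version B (the rewrite author's own statement) =====
-- stated objective: alternative
-- what changed: B replaces A's segment list that is sliced and re-joined in full on every line by a position-indexed table of cumulative prefixes plus a logical stack-size counter, so each path is one concatenation of a stored prefix with the new segment (constant-factor intent; measured only 1.4x, so not claimed as faster).
import Mathlib
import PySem

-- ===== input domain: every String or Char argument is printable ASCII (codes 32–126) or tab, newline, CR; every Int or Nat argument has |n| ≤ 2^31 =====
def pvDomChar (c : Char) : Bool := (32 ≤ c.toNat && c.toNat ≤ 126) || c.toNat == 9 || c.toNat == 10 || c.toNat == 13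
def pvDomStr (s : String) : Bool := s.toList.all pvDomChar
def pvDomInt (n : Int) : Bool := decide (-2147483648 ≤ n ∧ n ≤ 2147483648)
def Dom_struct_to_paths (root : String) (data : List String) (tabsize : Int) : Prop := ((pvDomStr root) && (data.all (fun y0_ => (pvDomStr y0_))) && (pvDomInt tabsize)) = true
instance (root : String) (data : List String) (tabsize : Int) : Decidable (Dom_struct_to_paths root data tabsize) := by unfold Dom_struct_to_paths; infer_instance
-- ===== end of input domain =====

-- B replaces A's per-line slice-and-re-join of a segment list by a position-indexed table of
-- cumulative prefixes plus a stack-size counter: one concatenation per line (alternative algorithm).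

-- ===== PORT A =====
-- nb_start_space: the 'for i in range(len(s)): if s[i] != ' ': return i' loop as structural recursion
def pvA_nbStartSpace : List Char → Int
  | [] => 0
  | c :: cs => if c ≠ ' ' then 0 else pvA_nbStartSpace cs + 1

-- the 'for element in data' loop of A: state = path (list of raw segments), emits ''.join(path)
def pvA_loop (ts : Int) : List (List Char) → List (List Char) → List (List Char)
  | _, [] => []
  | path, e :: rest =>
    let deep := PySem.Int.floordiv (pvA_nbStartSpace e) ts
    let path' := PySem.List.slice path none (some deep) ++ [PySem.List.slice e (some (deep * ts)) none]
    PySem.Chars.join [] path' :: pvA_loop ts path' rest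

def struct_to_paths (root : String) (data : List String) (tabsize : Int) : List String :=
  let rcs := root.toList
  let r1 := if PySem.List.pyGet? rcs (-1) ≠ some '/' then rcs ++ ['/'] else rcs
  (pvA_loop tabsize [r1] (data.map String.toList)).map String.ofList

-- ===== PORT B =====
-- Source B's loop: state = (pref : position ↦ cumulative prefix, size : logical stack size);
-- 'element.lstrip(' ')' is ported by hand as dropWhile (· == ' ') — exact: lstrip with the
-- explicit chars argument ' ' removes exactly the leading run of spaces.
def pvB_loop (ts : Int) : PySem.Dict Int (List Char) → Int → List (List Char) → List (List Char)
  | _, _, [] => []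
  | pref, size, e :: rest =>
    let deep := PySem.Int.floordiv ((e.length - (e.dropWhile (· == ' ')).length : Nat) : Int) ts
    let d := min deep size
    let full := (if 0 < d then (pref.get? (d - 1)).getD [] else []) ++
      PySem.List.slice e (some (deep * ts)) none
    full :: pvB_loop ts (pref.insert d full) (d + 1) rest

def struct_to_paths_alt (root : String) (data : List String) (tabsize : Int) : List String :=
  let rcs := root.toList
  let r1 := if PySem.Chars.endswith rcs ['/'] then rcs else rcs ++ ['/']
  (pvB_loop tabsize (PySem.Dict.mk [((0 : Int), r1)]) 1 (data.map String.toList)).map String.ofList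

-- ===== PRECONDITION & SPEC =====
-- Pre_ excludes exactly the inputs on which the Python A raises: root = '' (IndexError on
-- root[-1]) and tabsize = 0 with nonempty data (ZeroDivisionError on '//').
def Pre_struct_to_paths (root : String) (data : List String) (tabsize : Int) : Prop :=
  root.toList ≠ [] ∧ (tabsize ≠ 0 ∨ data = [])
instance (root : String) (data : List String) (tabsize : Int) : Decidable (Pre_struct_to_paths root data tabsize) := by unfold Pre_struct_to_paths; infer_instance

def pvWitness_struct_to_paths : String × List String × Int := ("r", ["a", "    b"], 4)

def Spec_struct_to_paths (root : String) (data : List String) (tabsize : Int) (out : List String) : Prop := out = struct_to_paths_alt root data tabsize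
instance (root : String) (data : List String) (tabsize : Int) (out : List String) : Decidable (Spec_struct_to_paths root data tabsize out) := by unfold Spec_struct_to_paths; infer_instance

-- ===== CLAIM (what is proved, stated in full; the proofs are below) =====
def Claim_equal_struct_to_paths : Prop := ∀ (root : String) (data : List String) (tabsize : Int), Dom_struct_to_paths root data tabsize → Pre_struct_to_paths root data tabsize → Spec_struct_to_paths root data tabsize (struct_to_paths root data tabsize)

-- ===== LEMMAS AND PROOFS =====

-- the two leading-space counts agree
theorem pv_lead_eq (e : List Char) :
    pvA_nbStartSpace e = ((e.length - (e.dropWhile (· == ' ')).length : Nat) : Int) := by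
  induction e with
  | nil => rfl
  | cons c cs ih =>
    by_cases h : c = ' '
    · have hle := List.length_dropWhile_le (p := fun c => c == ' ') cs
      simp [pvA_nbStartSpace, List.dropWhile, h, ih]
      omega
    · have h' : (c == ' ') = false := by simp [h]
      simp [pvA_nbStartSpace, List.dropWhile, h, h']

theorem pvJoin_nil (parts : List (List Char)) :
    PySem.Chars.join [] parts = parts.flatten := by
  induction parts with
  | nil => rfl
  | cons p ps ih =>
    cases ps with
    | nil => simp [PySem.Chars.join_singleton]
    | cons q qs => rw [PySem.Chars.join_cons_cons, ih]; simp

-- POSITIVE tabsize: invariant relating A's segment list to B's (pref, size)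
theorem pv_loop_pos (ts : Int) (hts : 0 < ts) (rest : List (List Char)) :
    ∀ (path : List (List Char)) (pref : PySem.Dict Int (List Char)),
      path ≠ [] →
      (∀ k : Nat, k < path.length → pref.get? (k : Int) = some (path.take (k+1)).flatten) →
      pvB_loop ts pref (path.length : Int) rest = pvA_loop ts path rest := by
  induction rest with
  | nil => intro _ _ _ _; rfl
  | cons e rest ih =>
    intro path pref hne hinv
    have hlen : 1 ≤ path.length := List.length_pos_iff.mpr hne
    simp only [pvA_loop, pvB_loop, pv_lead_eq]
    set n : Nat := e.length - (e.dropWhile (· == ' ')).length with hn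
    have hdeep0 : 0 ≤ PySem.Int.floordiv (n : Int) ts := by
      rw [PySem.Int.floordiv_eq_ediv_of_pos hts]
      exact Int.ediv_nonneg (by positivity) (le_of_lt hts)
    set deep : Int := PySem.Int.floordiv (n : Int) ts with hdeepdef
    clear_value deep
    set d : Int := min deep (path.length : Int) with hd
    have hd0 : 0 ≤ d := le_min hdeep0 (by exact_mod_cast Nat.zero_le _)
    have hdle : d ≤ (path.length : Int) := min_le_right _ _
    have hddeep : d ≤ deep := min_le_left _ _
    clear_value d
    set dn : Nat := d.toNat with hdn
    clear_value dn
    have hclamp : PySem.List.slice path none (some deep) = path.take dn := by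
      rw [PySem.List.slice_to path hdeep0]
      by_cases hcase : deep ≤ ((path.length : Nat) : Int)
      · congr 1; omega
      · rw [List.take_of_length_le (by omega), List.take_of_length_le (by omega)]
    set seg : List Char := PySem.List.slice e (some (deep * ts)) none with hseg
    have hfull : (if 0 < d then (pref.get? (d - 1)).getD [] else []) ++ seg
        = (path.take dn).flatten ++ seg := by
      by_cases hpos : 0 < d
      · have hk : dn - 1 < path.length := by omega
        have hv := hinv (dn - 1) hk
        rw [show dn - 1 + 1 = dn by omega] at hv
        rw [if_pos hpos, show d - 1 = ((dn - 1 : Nat) : Int) by omega, hv]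
        simp only [Option.getD_some]
      · have hz : dn = 0 := by omega
        simp [hpos, hz]
    rw [hclamp, pvJoin_nil]
    have hflat : (path.take dn ++ [seg]).flatten = (path.take dn).flatten ++ seg := by simp
    rw [hflat, hfull]
    congr 1
    have hlen' : (path.take dn ++ [seg]).length = dn + 1 := by
      simp [Nat.min_eq_left (show dn ≤ path.length by omega)]
    rw [show d + 1 = ((path.take dn ++ [seg]).length : Int) by rw [hlen']; omega]
    apply ih
    · simp
    · intro k hk
      rw [hlen'] at hk
      by_cases hkd : k = dn
      · subst hkd
        rw [show ((k : Nat) : Int) = d from by omega, PySem.Dict.get?_insert_self]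
        have htake : List.take (k+1) (List.take k path ++ [seg]) = List.take k path ++ [seg] :=
          List.take_of_length_le (le_of_eq hlen')
        rw [htake]
        simp
      · have hklt : k < dn := by omega
        have hne2 : ((k : Nat) : Int) ≠ d := by omega
        rw [PySem.Dict.get?_insert_of_ne _ _ hne2, hinv k (by omega)]
        congr 1
        rw [List.take_append_of_le_length (by simp; omega), List.take_take,
          Nat.min_eq_left (by omega)]

-- NEGATIVE tabsize: deep ≤ 0, A's stack stays a singleton, B's guard never fires
theorem pv_deep_nonpos (ts : Int) (hts : ts < 0) (n : Nat) :
    PySem.Int.floordiv (n : Int) ts ≤ 0 := by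
  have hmod := PySem.Int.mod_neg_bounds (a := (n : Int)) hts
  have heq := PySem.Int.floordiv_mul_add_mod (n : Int) ts
  nlinarith [hmod.1, hmod.2, Nat.cast_nonneg (α := ℤ) n]

theorem pv_loop_neg (ts : Int) (hts : ts < 0) (rest : List (List Char)) :
    ∀ (x : List Char) (pref : PySem.Dict Int (List Char)) (size : Int), size ≤ 1 →
      pvB_loop ts pref size rest = pvA_loop ts [x] rest := by
  induction rest with
  | nil => intro _ _ _ _; rfl
  | cons e rest ih =>
    intro x pref size hsize
    simp only [pvA_loop, pvB_loop, pv_lead_eq]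
    set n : Nat := e.length - (e.dropWhile (· == ' ')).length with hn
    have hdnp : PySem.Int.floordiv (n : Int) ts ≤ 0 := pv_deep_nonpos ts hts n
    set deep : Int := PySem.Int.floordiv (n : Int) ts with hdeep
    clear_value deep
    have hslice : PySem.List.slice ([x] : List (List Char)) none (some deep) = [] := by
      rcases hdnp.lt_or_eq with h | h
      · rw [show deep = -(((-deep).toNat : Nat) : Int) by omega,
          PySem.List.slice_to_neg_natCast ([x] : List (List Char)) (-deep).toNat (by omega)]
        rw [show ([x] : List (List Char)).length - (-deep).toNat = 0 by simp; omega]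
        rfl
      · rw [h, PySem.List.slice_to ([x] : List (List Char)) (by omega)]
        rfl
    rw [hslice, if_neg (by omega)]
    simp only [List.nil_append]
    rw [PySem.Chars.join_singleton]
    congr 1
    exact ih _ _ _ (by omega)

-- the '/'-fixup of A and of B compute the same root
theorem pv_root_eq (rcs : List Char) (hne : rcs ≠ []) :
    (if PySem.List.pyGet? rcs (-1) ≠ some '/' then rcs ++ ['/'] else rcs)
      = (if PySem.Chars.endswith rcs ['/'] then rcs else rcs ++ ['/']) := by
  rcases (List.eq_nil_or_concat rcs) with h | ⟨ys, c, h⟩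
  · exact absurd h hne
  subst h
  simp only [List.concat_eq_append] at hne ⊢
  have h1 : PySem.List.pyGet? (ys ++ [c]) (-1) = some c := by
    rw [show (-1 : Int) = -((1 : Nat) : Int) by norm_num,
      PySem.List.pyGet?_neg_natCast (ys ++ [c]) 1 (by norm_num) (by simp)]
    simp
  have h2 : PySem.Chars.endswith (ys ++ [c]) ['/'] = (c = '/' : Bool) := by
    by_cases hc : c = '/'
    · subst hc
      simp [(PySem.Chars.endswith_iff _ _).mpr ⟨ys, rfl⟩]
    · simp only [hc, decide_false]
      rw [← Bool.not_eq_true, ← ne_eq]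
      intro hcon
      rcases (PySem.Chars.endswith_iff _ _).mp hcon with ⟨zs, hzs⟩
      have := congrArg List.getLast? hzs
      simp at this
      exact hc this.symm
  rw [h1, h2]
  by_cases hc : c = '/' <;> simp [hc]

theorem struct_to_paths_eq (root : String) (data : List String) (tabsize : Int)
    (h : Pre_struct_to_paths root data tabsize) :
    struct_to_paths root data tabsize = struct_to_paths_alt root data tabsize := by
  obtain ⟨hroot, hts⟩ := h
  simp only [struct_to_paths, struct_to_paths_alt]
  rw [← pv_root_eq root.toList hroot]
  set r1 := if PySem.List.pyGet? root.toList (-1) ≠ some '/' then root.toList ++ ['/'] else root.toList with hr1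
  congr 1
  rcases lt_trichotomy tabsize 0 with hlt | heq | hgt
  · exact (pv_loop_neg tabsize hlt _ r1 _ 1 le_rfl).symm
  · rcases hts with hne | hnil
    · exact absurd heq hne
    · subst hnil; rfl
  · refine (pv_loop_pos tabsize hgt _ [r1] _ (by simp) ?_).symm
    intro k hk
    simp only [List.length_singleton] at hk
    interval_cases k
    simp [PySem.Dict.get?_mk_cons]

-- ===== VERDICT (by name: the statement is the Claim_ definition above) =====
theorem struct_to_paths_spec : Claim_equal_struct_to_paths := by
  intro root data tabsize _ hpre
  unfold Spec_struct_to_paths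
  exact struct_to_paths_eq root data tabsize hpre
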